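-- pv_equiv track=rewrite | github.com/korkje/aoc | 2021/10/part2.py | parse
-- ===== SOURCE A (Python) =====
-- openclose = {
--     '(': ')',
--     '[': ']',
--     '{': '}',
--     '<': '>',
-- }
--
-- def parse(line):
--     stack = []
--     for current in line:
--         if current in openclose:
--             stack.append(current)
--         elif not stack or openclose[stack.pop()] != current:
--             return None
--
--     return "".join(map(openclose.get, reversed(stack)))
-- ===== SOURCE B (Python) =====
-- openclose = {'(': ')', '[': ']', '{': '}', '<': '>'}
--
-- def parse(line):
--     s = line
--     while True:
--         t = s.replace('()', '').replace('[]', '').replace('{}', '').replace('<>', '')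
--         if t == s:
--             break
--         s = t
--     if any(c not in openclose for c in s):
--         return None
--     return "".join(openclose[c] for c in reversed(s))
-- ===== Notes on version B (the rewrite author's own statement) =====
-- stated objective: alternative
-- what changed: Replaces A's single-pass explicit stack parse by repeatedly deleting adjacent matched bracket pairs until a fixpoint, then reading corruption/completion off the reduced string.
import Mathlib
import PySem

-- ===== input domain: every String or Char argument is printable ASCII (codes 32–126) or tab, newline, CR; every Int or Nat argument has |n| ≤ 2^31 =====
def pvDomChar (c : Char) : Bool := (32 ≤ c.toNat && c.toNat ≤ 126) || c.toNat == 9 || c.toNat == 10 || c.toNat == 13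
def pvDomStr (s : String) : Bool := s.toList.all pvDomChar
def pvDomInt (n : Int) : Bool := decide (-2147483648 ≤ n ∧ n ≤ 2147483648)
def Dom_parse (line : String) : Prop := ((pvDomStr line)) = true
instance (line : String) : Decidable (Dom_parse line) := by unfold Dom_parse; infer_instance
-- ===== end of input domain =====

-- B replaces A's explicit stack by repeated deletion of adjacent matched pairs ('()','[]','{}','<>') until a fixpoint; 'alternative' objective, not faster.

-- ===== PORT A =====
-- membership test 'current in openclose' on the literal 4-key dict
def isOp (c : Char) : Bool := c == '(' || c == '[' || c == '{' || c == '<'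

-- 'openclose[c]' for the literal dict; only ever applied to openers (default branch unreachable in both ports)
def closeOf (c : Char) : Char :=
  if c = '(' then ')' else if c = '[' then ']' else if c = '{' then '}' else
  if c = '<' then '>' else c

-- the for-loop of A: stack with top at the head (Python appends at the end and reverses at the end)
def parseAux : List Char → List Char → Option (List Char)
  | st, [] => some st
  | st, c :: rest =>
    if isOp c then parseAux (c :: st) rest
    else match st with
      | [] => none
      | o :: st' => if closeOf o = c then parseAux st' rest else none

def parse (line : String) : Option String :=
  (parseAux [] line.toList).map (fun st => String.ofList (st.map closeOf))

-- ===== PORT B =====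
-- s.replace(<ab>, '') for a two-character pattern: left-to-right non-overlapping removal
def removeAll (a b : Char) : List Char → List Char
  | x :: y :: rest =>
      if x = a ∧ y = b then removeAll a b rest else x :: removeAll a b (y :: rest)
  | s => s

-- one iteration of B's while-loop body (the four chained replaces)
def stepB (s : List Char) : List Char :=
  removeAll '<' '>' (removeAll '{' '}' (removeAll '[' ']' (removeAll '(' ')' s)))

theorem removeAll_atom (a b : Char) (s : List Char)
    (h : ∀ (x y : Char) (rest : List Char), s = x :: y :: rest → False) :
    removeAll a b s = s := by
  cases s with
  | nil => rfl
  | cons x t => cases t with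
    | nil => rfl
    | cons y r => exact absurd rfl (h x y r)

theorem removeAll_length_le (a b : Char) (s : List Char) :
    (removeAll a b s).length ≤ s.length := by
  induction s using removeAll.induct a b with
  | case1 x y rest hxy ih => rw [removeAll, if_pos hxy]; simp only [List.length_cons]; omega
  | case2 x y rest hn ih => rw [removeAll, if_neg hn]; simp only [List.length_cons] at ih ⊢; omega
  | case3 s h => rw [removeAll_atom a b s h]

theorem removeAll_ne_lt (a b : Char) (s : List Char) (h : removeAll a b s ≠ s) :
    (removeAll a b s).length < s.length := by
  induction s using removeAll.induct a b with
  | case1 x y rest hxy ih =>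
      rw [removeAll, if_pos hxy]
      have := removeAll_length_le a b rest
      simp only [List.length_cons]; omega
  | case2 x y rest hn ih =>
      rw [removeAll, if_neg hn] at h ⊢
      have hne : removeAll a b (y :: rest) ≠ y :: rest := fun hc => h (by rw [hc])
      have := ih hne
      simp only [List.length_cons] at this ⊢; omega
  | case3 s h3 => exact absurd (removeAll_atom a b s h3) h

theorem removeAll_eq_or_lt (a b : Char) (s : List Char) :
    removeAll a b s = s ∨ (removeAll a b s).length < s.length := by
  by_cases h : removeAll a b s = s
  · exact Or.inl h
  · exact Or.inr (removeAll_ne_lt a b s h)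

theorem stepB_ne_lt (s : List Char) (h : stepB s ≠ s) : (stepB s).length < s.length := by
  unfold stepB at h ⊢
  have l1 := removeAll_length_le '(' ')' s
  have l2 := removeAll_length_le '[' ']' (removeAll '(' ')' s)
  have l3 := removeAll_length_le '{' '}' (removeAll '[' ']' (removeAll '(' ')' s))
  rcases removeAll_eq_or_lt '<' '>'
      (removeAll '{' '}' (removeAll '[' ']' (removeAll '(' ')' s))) with h4 | h4
  · rw [h4] at h ⊢
    rcases removeAll_eq_or_lt '{' '}' (removeAll '[' ']' (removeAll '(' ')' s)) with h3 | h3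
    · rw [h3] at h ⊢
      rcases removeAll_eq_or_lt '[' ']' (removeAll '(' ')' s) with h2 | h2
      · rw [h2] at h ⊢
        exact removeAll_ne_lt '(' ')' s h
      · omega
    · omega
  · omega

-- B's while-loop: repeat until the string stops changing
def reduceLoop (s : List Char) : List Char :=
  let t := stepB s
  if h : t = s then s else reduceLoop t
termination_by s.length
decreasing_by exact stepB_ne_lt s h

def parse_alt (line : String) : Option String :=
  let r := reduceLoop line.toList
  if r.all isOp then some (String.ofList (r.reverse.map closeOf)) else none

-- ===== PRECONDITION & SPEC =====
def Spec_parse (line : String) (out : Option String) : Prop := out = parse_alt line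
instance (line : String) (out : Option String) : Decidable (Spec_parse line out) := by unfold Spec_parse; infer_instance

-- ===== CLAIM (what is proved, stated in full; the proofs are below) =====
def Claim_equal_parse : Prop := ∀ (line : String), Dom_parse line → Spec_parse line (parse line)

-- ===== LEMMAS AND PROOFS =====

-- deleting one scan's worth of adjacent matched pairs does not change what A computes
theorem removeAll_parseAux (a b : Char) (ha : isOp a = true) (hb : closeOf a = b)
    (hbo : isOp b = false) :
    ∀ (s st : List Char), parseAux st (removeAll a b s) = parseAux st s := by
  intro s
  induction s using removeAll.induct a b with
  | case1 x y rest h ih =>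
      obtain ⟨hx, hy⟩ := h
      subst hx; subst hy
      intro st
      rw [removeAll, if_pos ⟨rfl, rfl⟩, ih st]
      simp [parseAux, ha, hbo, hb]
  | case2 x y rest hn ih =>
      intro st
      rw [removeAll, if_neg hn]
      by_cases hx : isOp x
      · simp only [parseAux, if_pos hx]; exact ih _
      · simp only [parseAux, if_neg hx]
        cases st with
        | nil => rfl
        | cons o st' =>
            by_cases ho : closeOf o = x
            · simp only [if_pos ho]; exact ih _
            · simp [if_neg ho]
  | case3 s h => intro st; rw [removeAll_atom a b s h]

theorem stepB_parseAux (s st : List Char) : parseAux st (stepB s) = parseAux st s := by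
  unfold stepB
  rw [removeAll_parseAux '<' '>' rfl rfl rfl,
      removeAll_parseAux '{' '}' rfl rfl rfl,
      removeAll_parseAux '[' ']' rfl rfl rfl,
      removeAll_parseAux '(' ')' rfl rfl rfl]

theorem reduceLoop_parseAux (s : List Char) : ∀ st, parseAux st (reduceLoop s) = parseAux st s := by
  induction s using reduceLoop.induct with
  | case1 s _t heq => intro st; rw [reduceLoop, dif_pos heq]
  | case2 s _t hne ih => intro st; rw [reduceLoop, dif_neg hne, ih st, stepB_parseAux]

theorem reduceLoop_fix (s : List Char) : stepB (reduceLoop s) = reduceLoop s := by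
  induction s using reduceLoop.induct with
  | case1 s _t heq => rw [reduceLoop, dif_pos heq]; exact heq
  | case2 s _t hne ih => rw [reduceLoop, dif_neg hne]; exact ih

-- a fixpoint of stepB is a fixpoint of each of the four removeAlls (by length accounting)
theorem stepB_fix_each (s : List Char) (h : stepB s = s) :
    removeAll '(' ')' s = s ∧ removeAll '[' ']' s = s ∧
    removeAll '{' '}' s = s ∧ removeAll '<' '>' s = s := by
  unfold stepB at h
  have hl : (removeAll '<' '>' (removeAll '{' '}' (removeAll '[' ']' (removeAll '(' ')' s)))).length
      = s.length := by rw [h]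
  have l2 := removeAll_length_le '[' ']' (removeAll '(' ')' s)
  have l3 := removeAll_length_le '{' '}' (removeAll '[' ']' (removeAll '(' ')' s))
  have l4 := removeAll_length_le '<' '>' (removeAll '{' '}' (removeAll '[' ']' (removeAll '(' ')' s)))
  have e1 : removeAll '(' ')' s = s := by
    rcases removeAll_eq_or_lt '(' ')' s with e | e
    · exact e
    · omega
  rw [e1] at h hl l2 l3 l4
  have e2 : removeAll '[' ']' s = s := by
    rcases removeAll_eq_or_lt '[' ']' s with e | e
    · exact e
    · omega
  rw [e2] at h hl l3 l4
  have e3 : removeAll '{' '}' s = s := by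
    rcases removeAll_eq_or_lt '{' '}' s with e | e
    · exact e
    · omega
  rw [e3] at h
  exact ⟨e1, e2, e3, h⟩

theorem removeAll_tail_fix (a b : Char) (x : Char) (t : List Char)
    (h : removeAll a b (x :: t) = x :: t) : removeAll a b t = t := by
  cases t with
  | nil => rfl
  | cons y r =>
      rw [removeAll] at h
      split at h
      · have := removeAll_length_le a b r
        have : (removeAll a b r).length = r.length + 2 := by rw [h]; simp
        omega
      · exact (List.cons.injEq _ _ _ _ ▸ h).2

-- a fixpoint contains no adjacent pair a,b anywhere
theorem removeAll_fix_noInfix (a b : Char) :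
    ∀ (s : List Char), removeAll a b s = s → ∀ u v, s ≠ u ++ a :: b :: v := by
  intro s
  induction s with
  | nil => intro _ u v hc; simp at hc
  | cons x t ih =>
      intro hfix u v hc
      cases u with
      | nil =>
          rw [List.nil_append, List.cons.injEq] at hc
          obtain ⟨hx, ht⟩ := hc
          rw [hx, ht, removeAll, if_pos ⟨rfl, rfl⟩] at hfix
          have h1 := removeAll_length_le a b v
          have h2 : (removeAll a b v).length = v.length + 2 := by rw [hfix]; simp
          omega
      | cons z u' =>
          rw [List.cons_append, List.cons.injEq] at hc
          exact ih (removeAll_tail_fix a b x t hfix) u' v hc.2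

theorem dropWhile_head_false (p : Char → Bool) :
    ∀ (r : List Char) (c : Char) (v : List Char), r.dropWhile p = c :: v → p c = false := by
  intro r
  induction r with
  | nil => intro c v h; simp at h
  | cons x t ih =>
      intro c v h
      rw [List.dropWhile_cons] at h
      split at h
      · exact ih c v h
      · rw [List.cons.injEq] at h
        rw [← h.1]; simpa using ‹¬p x = true›

-- running A over an all-opener block just pushes it
theorem parseAux_allOp (u : List Char) (hu : u.all isOp) (st : List Char) :
    parseAux st u = some (u.reverse ++ st) := by
  induction u generalizing st with
  | nil => simp [parseAux]
  | cons x t ih =>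
      simp only [List.all_cons, Bool.and_eq_true] at hu
      simp only [parseAux, if_pos hu.1]
      rw [ih hu.2]; simp

theorem parseAux_allOp_append (u : List Char) (hu : u.all isOp) (w st : List Char) :
    parseAux st (u ++ w) = parseAux (u.reverse ++ st) w := by
  induction u generalizing st with
  | nil => simp
  | cons x t ih =>
      simp only [List.all_cons, Bool.and_eq_true] at hu
      simp only [List.cons_append, parseAux, if_pos hu.1]
      rw [ih hu.2]; simp

-- on a fully reduced string A either pushes everything (all openers) or dies at the first non-opener
theorem parseAux_of_fix (r : List Char) (hfix : stepB r = r) :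
    parseAux [] r = (if r.all isOp then some r.reverse else none) := by
  by_cases hall : r.all isOp
  · rw [if_pos hall, parseAux_allOp r hall]; simp
  · rw [if_neg hall]
    have hsplit : r = r.takeWhile isOp ++ r.dropWhile isOp := (List.takeWhile_append_dropWhile).symm
    have htake : (r.takeWhile isOp).all isOp := by
      apply List.all_eq_true.mpr; intro x hx; exact List.mem_takeWhile_imp hx
    cases hdrop : r.dropWhile isOp with
    | nil =>
        exfalso; apply hall
        apply List.all_eq_true.mpr; intro x hx
        have : x ∈ r.takeWhile isOp := by
          rw [hsplit, hdrop] at hx; simpa using hx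
        exact List.mem_takeWhile_imp this
    | cons c v =>
        have hc : isOp c = false := dropWhile_head_false isOp r c v hdrop
        conv_lhs => rw [hsplit, hdrop]
        rw [parseAux_allOp_append _ htake]
        cases hrev : (r.takeWhile isOp).reverse with
        | nil => simp [parseAux, hc]
        | cons o rest =>
            have ho : isOp o = true := by
              have : o ∈ r.takeWhile isOp := by
                have : o ∈ (r.takeWhile isOp).reverse := by rw [hrev]; simp
                simpa using this
              exact List.mem_takeWhile_imp this
            have hno : closeOf o ≠ c := by
              intro hco
              have hshape : r = rest.reverse ++ o :: c :: v := by
                conv_lhs => rw [hsplit, hdrop]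
                have : r.takeWhile isOp = rest.reverse ++ [o] := by
                  have := congrArg List.reverse hrev
                  simpa using this
                rw [this]; simp
              obtain ⟨f1, f2, f3, f4⟩ := stepB_fix_each r hfix
              -- o is one of the four openers; its matched pair is an adjacent infix of r
              simp only [isOp, Bool.or_eq_true, beq_iff_eq] at ho
              rcases ho with ((h | h) | h) | h
              · subst h
                have hc' : c = ')' := by rw [← hco]; decide
                subst hc'
                exact removeAll_fix_noInfix '(' ')' r f1 rest.reverse v hshape
              · subst h
                have hc' : c = ']' := by rw [← hco]; decide
                subst hc'
                exact removeAll_fix_noInfix '[' ']' r f2 rest.reverse v hshape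
              · subst h
                have hc' : c = '}' := by rw [← hco]; decide
                subst hc'
                exact removeAll_fix_noInfix '{' '}' r f3 rest.reverse v hshape
              · subst h
                have hc' : c = '>' := by rw [← hco]; decide
                subst hc'
                exact removeAll_fix_noInfix '<' '>' r f4 rest.reverse v hshape
            simp only [List.cons_append]
            simp [parseAux, hc, hno]

-- ===== VERDICT (by name: the statement is the Claim_ definition above) =====
theorem parse_spec : Claim_equal_parse := by
  intro line _
  unfold Spec_parse parse parse_alt
  rw [← reduceLoop_parseAux line.toList []]
  rw [parseAux_of_fix _ (reduceLoop_fix line.toList)]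
  by_cases h : (reduceLoop line.toList).all isOp
  · simp [h]
  · simp [h]
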